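-- pv_equiv track=rewrite | github.com/TakaraGEG/White-Rabbit | src/manual.py | _test_clue_buckets
-- ===== SOURCE A (Python) =====
-- def _test_clue_buckets(clue_buckets):
--     """
--     Checks to see if any clue bucket contains two times
--     within 10 minutes of each other
--     """
--
--     for bucket in clue_buckets:
--         for i in range(len(bucket)):
--             for j in range(i + 1, len(bucket)):
--                 diff = abs(bucket[i] - bucket[j])
--                 if diff <= 10:
--                     return False
--
--     return True
-- ===== SOURCE B (Python) =====
-- def _test_clue_buckets(clue_buckets):
--     """Sort each bucket and check only adjacent sorted values for a gap <= 10."""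
--     for bucket in clue_buckets:
--         s = sorted(bucket)
--         for a, b in zip(s, s[1:]):
--             if b - a <= 10:
--                 return False
--     return True
-- ===== Notes on version B (the rewrite author's own statement) =====
-- stated objective: alternative
-- what changed: Replaces the O(k^2) all-pairs scan per bucket with a sort-then-adjacent-gap check (two elements within 10 exist iff some adjacent pair of the sorted bucket is within 10); on early-returning inputs both are equally quick.
import Mathlib
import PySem

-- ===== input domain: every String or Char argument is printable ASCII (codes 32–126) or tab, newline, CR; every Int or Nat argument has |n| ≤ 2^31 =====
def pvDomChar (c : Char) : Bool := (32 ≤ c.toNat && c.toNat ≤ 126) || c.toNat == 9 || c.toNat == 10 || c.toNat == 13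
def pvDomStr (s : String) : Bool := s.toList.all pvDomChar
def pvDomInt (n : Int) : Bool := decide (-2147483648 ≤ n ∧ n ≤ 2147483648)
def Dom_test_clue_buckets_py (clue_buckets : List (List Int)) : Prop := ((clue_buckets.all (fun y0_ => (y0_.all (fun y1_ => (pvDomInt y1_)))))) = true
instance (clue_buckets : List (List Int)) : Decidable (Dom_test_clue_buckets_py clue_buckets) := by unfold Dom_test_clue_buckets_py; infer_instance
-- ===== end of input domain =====

-- B replaces A's all-pairs scan per bucket by sorting the bucket and checking only
-- adjacent sorted values for a gap ≤ 10 (objective: alternative algorithm).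

-- ===== PORT A =====
-- literal port of A's three nested loops with early return (the early 'return False'
-- becomes the existential short-circuit of List.any, negated at the end)
def test_clue_buckets_py (clue_buckets : List (List Int)) : Bool :=
  !(clue_buckets.any (fun bucket =>
    (PySem.List.pyRange 0 (bucket.length : Int) 1).any (fun i =>
      (PySem.List.pyRange (i + 1) (bucket.length : Int) 1).any (fun j =>
        decide (|PySem.List.pyGetD bucket i 0 - PySem.List.pyGetD bucket j 0| ≤ 10)))))

-- ===== PORT B =====
-- B's inner loop: zip(s, s[1:]) — scan adjacent pairs, early return on gap ≤ 10
def adjClose : List Int → Bool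
  | x :: y :: rest => if y - x ≤ 10 then true else adjClose (y :: rest)
  | _ => false

def test_clue_buckets_py_alt (clue_buckets : List (List Int)) : Bool :=
  !(clue_buckets.any (fun bucket => adjClose (PySem.List.sorted bucket (fun x => x) false)))

-- ===== PRECONDITION & SPEC =====
def Spec_test_clue_buckets_py (clue_buckets : List (List Int)) (out : Bool) : Prop := out = test_clue_buckets_py_alt clue_buckets
instance (clue_buckets : List (List Int)) (out : Bool) : Decidable (Spec_test_clue_buckets_py clue_buckets out) := by unfold Spec_test_clue_buckets_py; infer_instance

-- ===== CLAIM (what is proved, stated in full; the proofs are below) =====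
def Claim_equal_test_clue_buckets_py : Prop := ∀ (clue_buckets : List (List Int)), Dom_test_clue_buckets_py clue_buckets → Spec_test_clue_buckets_py clue_buckets (test_clue_buckets_py clue_buckets)

-- ===== LEMMAS AND PROOFS =====

-- A's inner double loop finds a pair iff the bucket is not pairwise far apart
theorem aInner_iff (b : List Int) :
    ((PySem.List.pyRange 0 (b.length : Int) 1).any (fun i =>
      (PySem.List.pyRange (i + 1) (b.length : Int) 1).any (fun j =>
        decide (|PySem.List.pyGetD b i 0 - PySem.List.pyGetD b j 0| ≤ 10)))) = true
    ↔ ¬ b.Pairwise (fun x y => 10 < |x - y|) := by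
  rw [List.pairwise_iff_getElem]
  push Not
  simp only [List.any_eq_true, PySem.List.mem_pyRange_one]
  constructor
  · rintro ⟨i, ⟨hi0, hin⟩, j, ⟨hji, hjn⟩, hd⟩
    rw [PySem.List.pyGetD_eq_getElem b 0 hi0 hin,
        PySem.List.pyGetD_eq_getElem b 0 (by omega) hjn] at hd
    exact ⟨i.toNat, j.toNat, by omega, by omega, by omega, by simpa using hd⟩
  · rintro ⟨i, j, hi, hj, hij, hd⟩
    refine ⟨(i : Int), ⟨by omega, by omega⟩, (j : Int), ⟨by omega, by omega⟩, ?_⟩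
    rw [PySem.List.pyGetD_eq_getElem b 0 (by omega) (by omega),
        PySem.List.pyGetD_eq_getElem b 0 (by omega) (by omega)]
    simpa using hd

-- on a ≤-sorted list, some adjacent gap is ≤ 10 iff some pair is within 10
theorem adjClose_iff (s : List Int) (hs : s.Pairwise (· ≤ ·)) :
    adjClose s = true ↔ ¬ s.Pairwise (fun x y => 10 < |x - y|) := by
  induction s with
  | nil => simp [adjClose]
  | cons a t ih =>
    cases t with
    | nil => simp [adjClose]
    | cons b t =>
      rw [List.pairwise_cons] at hs
      obtain ⟨hle, hs'⟩ := hs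
      have hab : a ≤ b := hle b (by simp)
      have hbt : ∀ y ∈ b :: t, b ≤ y := by
        intro y hy
        rcases List.mem_cons.mp hy with h | h
        · omega
        · exact (List.pairwise_cons.mp hs').1 y h
      by_cases h10 : b - a ≤ 10
      · simp only [adjClose, if_pos h10, true_iff]
        intro hp
        have := (List.pairwise_cons.mp hp).1 b (by simp)
        have : |a - b| = b - a := by rw [abs_sub_comm]; exact abs_of_nonneg (by omega)
        omega
      · simp only [adjClose, if_neg h10]
        rw [ih hs']
        constructor
        · intro hnp hp
          exact hnp (List.pairwise_cons.mp hp).2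
        · intro hnp hp
          apply hnp
          refine List.pairwise_cons.mpr ⟨fun y hy => ?_, hp⟩
          have h1 := hle y hy
          have h2 := hbt y hy
          have : |a - y| = y - a := by rw [abs_sub_comm]; exact abs_of_nonneg (by omega)
          omega

theorem bucket_eq (b : List Int) :
    ((PySem.List.pyRange 0 (b.length : Int) 1).any (fun i =>
      (PySem.List.pyRange (i + 1) (b.length : Int) 1).any (fun j =>
        decide (|PySem.List.pyGetD b i 0 - PySem.List.pyGetD b j 0| ≤ 10))))
    = adjClose (PySem.List.sorted b (fun x => x) false) := by
  have hperm := (PySem.List.sorted_perm b (fun x => x) false).pairwise_iff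
    (R := fun x y => 10 < |x - y|) (fun {x y} h => by simpa [abs_sub_comm] using h)
  have h1 := aInner_iff b
  have h2 := adjClose_iff (PySem.List.sorted b (fun x => x) false)
    (PySem.List.sorted_pairwise b (fun x => x))
  rw [hperm] at h2
  rw [Bool.eq_iff_iff, h1, h2]


-- ===== VERDICT (by name: the statement is the Claim_ definition above) =====
theorem test_clue_buckets_py_spec : Claim_equal_test_clue_buckets_py := by
  intro clue_buckets _
  unfold Spec_test_clue_buckets_py test_clue_buckets_py test_clue_buckets_py_alt
  have hfg : (fun bucket : List Int =>
      ((PySem.List.pyRange 0 (bucket.length : Int) 1).any (fun i =>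
        (PySem.List.pyRange (i + 1) (bucket.length : Int) 1).any (fun j =>
          decide (|PySem.List.pyGetD bucket i 0 - PySem.List.pyGetD bucket j 0| ≤ 10)))))
      = (fun bucket : List Int => adjClose (PySem.List.sorted bucket (fun x => x) false)) :=
    funext bucket_eq
  rw [hfg]
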